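-- pv_equiv track=rewrite | github.com/kimeujin03-droid/Magnatic | evaluate_themis_baseline.py | build_feature_sets
-- ===== SOURCE A (Python) =====
-- LEAKAGE_COLUMNS = {
--     "time",
--     "date",
--     "Vx",
--     "Vy",
--     "Vz",
--     "Vx_good",
--     "Vy_good",
--     "Vz_good",
--     "V_abs",
--     "V_perp",
--     "mom_quality",
--     "bbf_label",
--     "future_bbf_5m",
-- }
--
-- RAW_FGM_FEATURES = {
--     "Bx",
--     "By",
--     "Bz",
--     "B_total",
--     "B_std_1m",
--     "Bz_std_1m",
--     "Bz_sign_change_1m",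
--     "B_total_slope_1m",
-- }
--
-- PHYSICS_FGM_FEATURES = {
--     "dip_angle_deg",
--     "stretching_index",
--     "stretching_index_log",
--     "magnetic_pressure_proxy",
--     "sheet_proximity",
--     "Bz_trend_1m",
--     "Bz_trend_5m",
--     "Bz_trend_15m",
--     "Bx_var_3m",
--     "Bz_var_3m",
--     "B_total_var_3m",
--     "P_mag_ratio_30m",
-- }
--
-- FBK_FEATURES = {
--     "scm1_ch0",
--     "scm1_ch1",
--     "scm1_ch2",
--     "scm1_mean",
--     "scm1_max",
--     "scm1_low_high_ratio",
--     "scm1_mean_slope_1m",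
--     "scm1_max_slope_1m",
--     "scm1_max_rollmax_1m",
--     "scm2_ch0",
--     "scm2_ch1",
--     "scm2_ch2",
--     "scm2_mean",
--     "scm2_max",
--     "scm2_low_high_ratio",
--     "scm2_mean_slope_1m",
--     "scm2_max_slope_1m",
--     "scm2_max_rollmax_1m",
--     "scm3_ch0",
--     "scm3_ch1",
--     "scm3_ch2",
--     "scm3_mean",
--     "scm3_max",
--     "scm3_low_high_ratio",
--     "scm3_mean_slope_1m",
--     "scm3_max_slope_1m",
--     "scm3_max_rollmax_1m",
--     "edc12_ch0",
--     "edc12_ch1",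
--     "edc12_ch2",
--     "edc12_mean",
--     "edc12_max",
--     "edc12_low_high_ratio",
--     "edc12_mean_slope_1m",
--     "edc12_max_slope_1m",
--     "edc12_max_rollmax_1m",
-- }
--
-- def build_feature_sets(columns: list[str]) -> dict[str, list[str]]:
--     allowed = {c for c in columns if c not in LEAKAGE_COLUMNS}
--
--     raw_fgm = sorted(RAW_FGM_FEATURES & allowed)
--     physics_fgm = sorted(PHYSICS_FGM_FEATURES & allowed)
--     fbk = sorted(FBK_FEATURES & allowed)
--
--     return {
--         "raw_fgm": raw_fgm,
--         "raw_fgm_fbk": raw_fgm + fbk,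
--         "physics_only": physics_fgm,
--         "physics_fbk": physics_fgm + fbk,
--         "hybrid_fgm": raw_fgm + physics_fgm,
--         "hybrid_fgm_fbk": raw_fgm + physics_fgm + fbk,
--     }
-- ===== SOURCE B (Python) =====
-- LEAKAGE_COLUMNS = {
--     "time", "date", "Vx", "Vy", "Vz", "Vx_good", "Vy_good", "Vz_good",
--     "V_abs", "V_perp", "mom_quality", "bbf_label", "future_bbf_5m",
-- }
--
-- RAW_FGM_FEATURES = {
--     "Bx", "By", "Bz", "B_total", "B_std_1m", "Bz_std_1m",
--     "Bz_sign_change_1m", "B_total_slope_1m",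
-- }
--
-- PHYSICS_FGM_FEATURES = {
--     "dip_angle_deg", "stretching_index", "stretching_index_log",
--     "magnetic_pressure_proxy", "sheet_proximity", "Bz_trend_1m",
--     "Bz_trend_5m", "Bz_trend_15m", "Bx_var_3m", "Bz_var_3m",
--     "B_total_var_3m", "P_mag_ratio_30m",
-- }
--
-- FBK_FEATURES = {
--     "scm1_ch0", "scm1_ch1", "scm1_ch2", "scm1_mean", "scm1_max",
--     "scm1_low_high_ratio", "scm1_mean_slope_1m", "scm1_max_slope_1m",
--     "scm1_max_rollmax_1m",
--     "scm2_ch0", "scm2_ch1", "scm2_ch2", "scm2_mean", "scm2_max",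
--     "scm2_low_high_ratio", "scm2_mean_slope_1m", "scm2_max_slope_1m",
--     "scm2_max_rollmax_1m",
--     "scm3_ch0", "scm3_ch1", "scm3_ch2", "scm3_mean", "scm3_max",
--     "scm3_low_high_ratio", "scm3_mean_slope_1m", "scm3_max_slope_1m",
--     "scm3_max_rollmax_1m",
--     "edc12_ch0", "edc12_ch1", "edc12_ch2", "edc12_mean", "edc12_max",
--     "edc12_low_high_ratio", "edc12_mean_slope_1m", "edc12_max_slope_1m",
--     "edc12_max_rollmax_1m",
-- }
--
--
-- def build_feature_sets(columns: list[str]) -> dict[str, list[str]]: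
--     # Single classification pass over the globally sorted distinct columns.
--     # The three feature-name sets are pairwise disjoint and disjoint from the
--     # leakage names, so classifying each column once reproduces the three
--     # independently sorted intersection lists of the original.
--     raw, phys, fbk = [], [], []
--     for c in sorted(set(columns)):
--         if c in RAW_FGM_FEATURES:
--             raw.append(c)
--         elif c in PHYSICS_FGM_FEATURES:
--             phys.append(c)
--         elif c in FBK_FEATURES:
--             fbk.append(c)
--     return {
--         "raw_fgm": raw,
--         "raw_fgm_fbk": raw + fbk,
--         "physics_only": phys,
--         "physics_fbk": phys + fbk,
--         "hybrid_fgm": raw + phys,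
--         "hybrid_fgm_fbk": raw + phys + fbk,
--     }
-- ===== Notes on version B (the rewrite author's own statement) =====
-- stated objective: alternative
-- what changed: Replaces A's three separate set-intersections (each followed by its own sort) with a single classification pass over the globally sorted distinct columns that appends each name to one of three accumulator lists, dropping the leakage filter since the leakage names are disjoint from all three feature-name sets.
import Mathlib
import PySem

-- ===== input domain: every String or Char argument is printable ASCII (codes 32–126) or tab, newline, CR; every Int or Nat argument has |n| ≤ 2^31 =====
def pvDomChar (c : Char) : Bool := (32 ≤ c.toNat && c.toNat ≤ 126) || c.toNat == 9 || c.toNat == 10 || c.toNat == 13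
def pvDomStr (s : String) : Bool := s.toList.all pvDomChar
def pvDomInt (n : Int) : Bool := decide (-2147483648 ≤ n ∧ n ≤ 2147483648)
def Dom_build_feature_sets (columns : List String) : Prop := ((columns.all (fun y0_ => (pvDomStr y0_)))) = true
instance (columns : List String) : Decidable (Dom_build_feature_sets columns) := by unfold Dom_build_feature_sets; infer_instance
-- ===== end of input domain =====

-- B replaces the three set-intersections + three sorts by ONE classification pass over the
-- globally sorted distinct columns (the leakage filter drops out because the leakage names are
-- disjoint from all three feature-name sets); objective: alternative decomposition.

-- ===== PORT A =====
def pvLEAK : List String :=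
  ["time", "date", "Vx", "Vy", "Vz", "Vx_good", "Vy_good", "Vz_good",
   "V_abs", "V_perp", "mom_quality", "bbf_label", "future_bbf_5m"]

def pvRAW : List String :=
  ["Bx", "By", "Bz", "B_total", "B_std_1m", "Bz_std_1m",
   "Bz_sign_change_1m", "B_total_slope_1m"]

def pvPHYS : List String :=
  ["dip_angle_deg", "stretching_index", "stretching_index_log",
   "magnetic_pressure_proxy", "sheet_proximity", "Bz_trend_1m",
   "Bz_trend_5m", "Bz_trend_15m", "Bx_var_3m", "Bz_var_3m",
   "B_total_var_3m", "P_mag_ratio_30m"]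

def pvFBK : List String :=
  ["scm1_ch0", "scm1_ch1", "scm1_ch2", "scm1_mean", "scm1_max",
   "scm1_low_high_ratio", "scm1_mean_slope_1m", "scm1_max_slope_1m",
   "scm1_max_rollmax_1m",
   "scm2_ch0", "scm2_ch1", "scm2_ch2", "scm2_mean", "scm2_max",
   "scm2_low_high_ratio", "scm2_mean_slope_1m", "scm2_max_slope_1m",
   "scm2_max_rollmax_1m",
   "scm3_ch0", "scm3_ch1", "scm3_ch2", "scm3_mean", "scm3_max",
   "scm3_low_high_ratio", "scm3_mean_slope_1m", "scm3_max_slope_1m",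
   "scm3_max_rollmax_1m",
   "edc12_ch0", "edc12_ch1", "edc12_ch2", "edc12_mean", "edc12_max",
   "edc12_low_high_ratio", "edc12_mean_slope_1m", "edc12_max_slope_1m",
   "edc12_max_rollmax_1m"]

def build_feature_sets (columns : List String) : List (String × List String) :=
  let allowed : PySem.Set String :=
    PySem.Set.ofList (columns.filter (fun c => !(pvLEAK.contains c)))
  let raw_fgm := PySem.List.sorted (PySem.Set.inter pvRAW allowed) (fun x => x) false
  let physics_fgm := PySem.List.sorted (PySem.Set.inter pvPHYS allowed) (fun x => x) false
  let fbk := PySem.List.sorted (PySem.Set.inter pvFBK allowed) (fun x => x) false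
  [("raw_fgm", raw_fgm),
   ("raw_fgm_fbk", raw_fgm ++ fbk),
   ("physics_only", physics_fgm),
   ("physics_fbk", physics_fgm ++ fbk),
   ("hybrid_fgm", raw_fgm ++ physics_fgm),
   ("hybrid_fgm_fbk", raw_fgm ++ physics_fgm ++ fbk)]

-- ===== PORT B =====
-- the classification loop: one pass, three accumulators
def pvClassify (l : List String) : List String × List String × List String :=
  l.foldl (fun acc c =>
    if pvRAW.contains c then (acc.1 ++ [c], acc.2.1, acc.2.2)
    else if pvPHYS.contains c then (acc.1, acc.2.1 ++ [c], acc.2.2)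
    else if pvFBK.contains c then (acc.1, acc.2.1, acc.2.2 ++ [c])
    else acc) ([], [], [])

def build_feature_sets_alt (columns : List String) : List (String × List String) :=
  let t := pvClassify (PySem.List.sorted (PySem.Set.ofList columns) (fun x => x) false)
  let raw := t.1
  let phys := t.2.1
  let fbk := t.2.2
  [("raw_fgm", raw),
   ("raw_fgm_fbk", raw ++ fbk),
   ("physics_only", phys),
   ("physics_fbk", phys ++ fbk),
   ("hybrid_fgm", raw ++ phys),
   ("hybrid_fgm_fbk", raw ++ phys ++ fbk)]

-- ===== PRECONDITION & SPEC =====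
def Spec_build_feature_sets (columns : List String) (out : List (String × List String)) : Prop := out = build_feature_sets_alt columns
instance (columns : List String) (out : List (String × List String)) : Decidable (Spec_build_feature_sets columns out) := by unfold Spec_build_feature_sets; infer_instance

-- ===== CLAIM (what is proved, stated in full; the proofs are below) =====
def Claim_equal_build_feature_sets : Prop := ∀ (columns : List String), Dom_build_feature_sets columns → Spec_build_feature_sets columns (build_feature_sets columns)

-- ===== LEMMAS AND PROOFS =====

-- the classification fold computes three filters of its input
theorem pvClassify_eq_filters (l : List String) :
    pvClassify l =
      (l.filter (fun c => pvRAW.contains c),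
       l.filter (fun c => !pvRAW.contains c && pvPHYS.contains c),
       l.filter (fun c => !pvRAW.contains c && !pvPHYS.contains c && pvFBK.contains c)) := by
  suffices h : ∀ (l : List String) (r p f : List String),
      l.foldl (fun acc c =>
        if pvRAW.contains c then (acc.1 ++ [c], acc.2.1, acc.2.2)
        else if pvPHYS.contains c then (acc.1, acc.2.1 ++ [c], acc.2.2)
        else if pvFBK.contains c then (acc.1, acc.2.1, acc.2.2 ++ [c])
        else acc) (r, p, f) =
      (r ++ l.filter (fun c => pvRAW.contains c),
       p ++ l.filter (fun c => !pvRAW.contains c && pvPHYS.contains c),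
       f ++ l.filter (fun c => !pvRAW.contains c && !pvPHYS.contains c && pvFBK.contains c)) by
    simpa [pvClassify] using h l [] [] []
  intro l
  induction l with
  | nil => intro r p f; simp
  | cons c l ih =>
    intro r p f
    simp only [List.foldl_cons, List.filter_cons]
    split_ifs <;> rw [ih] <;> simp_all [List.append_assoc]

-- a nodup list with the right membership IS the filtered sorted-distinct-columns list, sorted
theorem sorted_eq_filter_sorted_set (zs columns : List String) (q : String → Bool)
    (hnd : zs.Nodup) (h : ∀ c, c ∈ zs ↔ (c ∈ columns ∧ q c = true)) :
    PySem.List.sorted zs (fun x => x) false =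
      (PySem.List.sorted (PySem.Set.ofList columns) (fun x => x) false).filter q := by
  have hS : (PySem.List.sorted (PySem.Set.ofList columns) (fun x => x) false).Pairwise (· < ·) :=
    PySem.List.sorted_ofList_pairwise_lt columns
  have hfp : ((PySem.List.sorted (PySem.Set.ofList columns) (fun x => x) false).filter q).Pairwise (· < ·) :=
    List.Pairwise.sublist List.filter_sublist hS
  have hfnd : ((PySem.List.sorted (PySem.Set.ofList columns) (fun x => x) false).filter q).Nodup :=
    hfp.imp (fun h => ne_of_lt h)
  have hperm : ((PySem.List.sorted (PySem.Set.ofList columns) (fun x => x) false).filter q).Perm zs := by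
    rw [List.perm_ext_iff_of_nodup hfnd hnd]
    intro c
    rw [h c, List.mem_filter, PySem.List.mem_sorted, PySem.Set.mem_ofList]
  exact PySem.List.sorted_eq_of_perm_of_pairwise_lt _ _ _ hperm hfp

-- disjointness of the literal name sets
theorem pvRAW_nodup : pvRAW.Nodup := by decide
theorem pvPHYS_nodup : pvPHYS.Nodup := by decide
theorem pvFBK_nodup : pvFBK.Nodup := by decide
theorem pvRAW_leak : ∀ c ∈ pvRAW, c ∉ pvLEAK := by decide
theorem pvPHYS_leak : ∀ c ∈ pvPHYS, c ∉ pvLEAK := by decide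
theorem pvFBK_leak : ∀ c ∈ pvFBK, c ∉ pvLEAK := by decide
theorem pvPHYS_raw : ∀ c ∈ pvPHYS, c ∉ pvRAW := by decide
theorem pvFBK_raw : ∀ c ∈ pvFBK, c ∉ pvRAW := by decide
theorem pvFBK_phys : ∀ c ∈ pvFBK, c ∉ pvPHYS := by decide

-- each of A's three sorted intersections is the corresponding filter of B's sorted distinct columns
theorem sorted_inter_eq (L columns : List String) (q : String → Bool) (hL : L.Nodup)
    (hdisj : ∀ c ∈ L, c ∉ pvLEAK) (hiff : ∀ c, q c = true ↔ c ∈ L) :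
    PySem.List.sorted
        (PySem.Set.inter L (PySem.Set.ofList (columns.filter (fun c => !(pvLEAK.contains c)))))
        (fun x => x) false =
      (PySem.List.sorted (PySem.Set.ofList columns) (fun x => x) false).filter q := by
  apply sorted_eq_filter_sorted_set
  · exact PySem.Set.nodup_inter _ _ hL
  · intro c
    rw [PySem.Set.mem_inter, PySem.Set.mem_ofList, List.mem_filter]
    simp only [List.contains_eq_mem, Bool.not_eq_eq_eq_not, Bool.not_true, decide_eq_false_iff_not]
    constructor
    · rintro ⟨hcl, hcc, _⟩
      exact ⟨hcc, (hiff c).mpr hcl⟩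
    · rintro ⟨hcc, hqc⟩
      have hcl := (hiff c).mp hqc
      exact ⟨hcl, hcc, hdisj c hcl⟩

-- ===== VERDICT (by name: the statement is the Claim_ definition above) =====
theorem build_feature_sets_spec : Claim_equal_build_feature_sets := by
  intro columns _
  unfold Spec_build_feature_sets build_feature_sets build_feature_sets_alt
  rw [pvClassify_eq_filters]
  have hraw := sorted_inter_eq pvRAW columns (fun c => pvRAW.contains c) pvRAW_nodup pvRAW_leak
    (by intro c; simp [List.contains_eq_mem])
  have hphys := sorted_inter_eq pvPHYS columns
    (fun c => !pvRAW.contains c && pvPHYS.contains c) pvPHYS_nodup pvPHYS_leak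
    (by
      intro c
      simp only [List.contains_eq_mem, Bool.and_eq_true, Bool.not_eq_eq_eq_not, Bool.not_true,
        decide_eq_false_iff_not, decide_eq_true_eq]
      exact ⟨fun h => h.2, fun h => ⟨pvPHYS_raw c h, h⟩⟩)
  have hfbk := sorted_inter_eq pvFBK columns
    (fun c => !pvRAW.contains c && !pvPHYS.contains c && pvFBK.contains c) pvFBK_nodup pvFBK_leak
    (by
      intro c
      simp only [List.contains_eq_mem, Bool.and_eq_true, Bool.not_eq_eq_eq_not, Bool.not_true,
        decide_eq_false_iff_not, decide_eq_true_eq]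
      exact ⟨fun h => h.2, fun h => ⟨⟨pvFBK_raw c h, pvFBK_phys c h⟩, h⟩⟩)
  simp only [hraw, hphys, hfbk]
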